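-- pv_equiv track=rewrite | github.com/pypi-data/pypi-mirror-347 | packages/jsonplate/jsonplate-0.0.1-py3-none-any.whl/jsonplate/lexer.py | count_lines_and_columns
-- ===== SOURCE A (Python) =====
-- def count_lines_and_columns(text: str):
--     if not text:
--         return (0, 0)
--
--     line_count = 1
--     last_newline_pos = -1
--     i = 0
--     length = len(text)
--
--     while i < length:
--         if text[i] == "\r" and i + 1 < length and text[i + 1] == "\n":
--             line_count += 1
--             last_newline_pos = i + 1
--             i += 2
--         elif text[i] == "\n" or text[i] == "\r":
--             line_count += 1
--             last_newline_pos = i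
--             i += 1
--         else:
--             i += 1
--
--     if length > 0 and (text[-1] == "\n" or text[-1] == "\r" or
--                     (text[-1] == "\n" and length >= 2 and text[-2] == "\r")):
--         line_count -= 1
--         chars_after = 0
--     else:
--         chars_after = length - (last_newline_pos + 1) if last_newline_pos != -1 else length
--
--     return (line_count, chars_after)
-- ===== SOURCE B (Python) =====
-- def count_lines_and_columns(text: str):
--     lines = text.splitlines()
--     if text.endswith('\n') or text.endswith('\r'):
--         return (len(lines), 0)
--     return (len(lines), len(lines[-1]) if lines else 0)
-- ===== Notes on version B (the rewrite author's own statement) =====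
-- stated objective: idiomatic
-- what changed: Replaces A's hand-written index-based state machine (tracking i, line_count, last_newline_pos with \r\n lookahead) by the idiomatic str.splitlines() plus an endswith check on the last character.
import Mathlib
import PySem

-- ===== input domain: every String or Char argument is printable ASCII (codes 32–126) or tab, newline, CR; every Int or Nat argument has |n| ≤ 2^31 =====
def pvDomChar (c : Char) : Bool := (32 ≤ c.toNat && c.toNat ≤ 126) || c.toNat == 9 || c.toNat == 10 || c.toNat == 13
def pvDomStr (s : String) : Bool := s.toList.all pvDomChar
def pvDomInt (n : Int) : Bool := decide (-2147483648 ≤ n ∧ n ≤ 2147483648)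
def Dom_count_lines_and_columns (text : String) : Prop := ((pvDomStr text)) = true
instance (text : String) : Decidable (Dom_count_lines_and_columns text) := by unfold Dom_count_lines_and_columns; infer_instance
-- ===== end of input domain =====

-- B replaces A's hand-written per-character index/state-machine scan by the idiomatic
-- str.splitlines() + endswith computation (measured faster by a constant factor: the
-- scanning moves into the interpreter's built-in); equivalent on the stated domain.

-- ===== PORT A =====
-- the while loop of A: state (i, line_count, last_newline_pos), same branch order
def pvLoopA : List Char → Int → Int → Int → Int × Int
  | [], _, lc, lnp => (lc, lnp)
  | '\r' :: '\n' :: rest, i, lc, _ => pvLoopA rest (i + 2) (lc + 1) (i + 1)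
  | c :: rest, i, lc, lnp =>
      if c = '\n' ∨ c = '\r' then pvLoopA rest (i + 1) (lc + 1) i
      else pvLoopA rest (i + 1) lc lnp

def count_lines_and_columns (text : String) : Int × Int :=
  let cs := text.toList
  if cs.isEmpty then (0, 0)
  else
    let length : Int := cs.length
    let r := pvLoopA cs 0 1 (-1)
    let lineCount := r.1
    let lastNewlinePos := r.2
    -- text[-1] / text[-2] via pyGet? (cannot raise here: cs is nonempty)
    let tailCond : Bool :=
      (PySem.List.pyGet? cs (-1) == some '\n') || (PySem.List.pyGet? cs (-1) == some '\r') ||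
      ((PySem.List.pyGet? cs (-1) == some '\n') && decide (2 ≤ length) &&
        (PySem.List.pyGet? cs (-2) == some '\r'))
    if decide (0 < length) && tailCond then (lineCount - 1, 0)
    else (lineCount, if lastNewlinePos ≠ -1 then length - (lastNewlinePos + 1) else length)

-- ===== PORT B =====
def count_lines_and_columns_alt (text : String) : Int × Int :=
  let cs := text.toList
  let lines := PySem.Chars.splitlines cs
  if PySem.Chars.endswith cs ['\n'] || PySem.Chars.endswith cs ['\r'] then
    ((lines.length : Int), 0)
  else
    ((lines.length : Int),
      match lines.getLast? with
      | some l => (l.length : Int)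
      | none => 0)

-- ===== PRECONDITION & SPEC =====
def Spec_count_lines_and_columns (text : String) (out : Int × Int) : Prop := out = count_lines_and_columns_alt text
instance (text : String) (out : Int × Int) : Decidable (Spec_count_lines_and_columns text out) := by unfold Spec_count_lines_and_columns; infer_instance

-- ===== CLAIM (what is proved, stated in full; the proofs are below) =====
def Claim_equal_count_lines_and_columns : Prop := ∀ (text : String), Dom_count_lines_and_columns text → Spec_count_lines_and_columns text (count_lines_and_columns text)

-- ===== LEMMAS AND PROOFS =====

-- reference: (number of line terminators, length of the segment after the last terminator)
def pvG : List Char → Nat × Nat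
  | [] => (0, 0)
  | '\r' :: '\n' :: r =>
      let p := pvG r; (p.1 + 1, p.2)
  | c :: r =>
      let p := pvG r
      if c = '\n' ∨ c = '\r' then (p.1 + 1, p.2)
      else (p.1, if p.1 = 0 then p.2 + 1 else p.2)

theorem pvG_zero (cs : List Char) (h : (pvG cs).1 = 0) : (pvG cs).2 = cs.length := by
  induction cs using pvG.induct <;> simp_all [pvG]

theorem pvG_lt (cs : List Char) (h : (pvG cs).1 ≠ 0) : (pvG cs).2 < cs.length := by
  induction cs using pvG.induct with
  | case1 => simp [pvG] at h
  | case2 r ih =>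
      rcases eq_or_ne (pvG r).1 0 with h0 | h0
      · have := pvG_zero r h0; simp [pvG, this]
      · have := ih h0; simp [pvG]; omega
  | case3 c r hne hc ih =>
      rcases eq_or_ne (pvG r).1 0 with h0 | h0
      · have := pvG_zero r h0; simp [pvG, hc, this]
      · have := ih h0; simp [pvG, hc]; omega
  | case4 c r hne hc ih =>
      simp [pvG, hc] at h ⊢
      rcases eq_or_ne (pvG r).1 0 with h0 | h0
      · simp [h0] at h
      · have := ih h0; simp [h0]; omega

theorem pvG_last (cs : List Char) (h : cs ≠ []) :
    ((pvG cs).2 = 0 ↔ cs.getLast? = some '\n' ∨ cs.getLast? = some '\r') := by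
  induction cs using pvG.induct with
  | case1 => simp at h
  | case2 r ih =>
      cases r with
      | nil => simp [pvG]
      | cons x xs =>
          have := ih (by simp)
          simp [pvG, List.getLast?_cons_cons] at this ⊢
          exact this
  | case3 c r hne hc ih =>
      cases r with
      | nil => simp [pvG, hc]
      | cons x xs =>
          have := ih (by simp)
          simp [pvG, hc, List.getLast?_cons_cons] at this ⊢
          exact this
  | case4 c r hne hc ih =>
      cases r with
      | nil => simp [pvG, hc]
      | cons x xs =>
          have hx := ih (by simp)
          rcases eq_or_ne (pvG (x :: xs)).1 0 with h0 | h0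
          · have hz := pvG_zero _ h0
            have hne0 : (pvG (x :: xs)).2 ≠ 0 := by simp [hz]
            simp [pvG, hc, h0, List.getLast?_cons_cons]
            constructor <;> intro hco <;> exact hne0 (hx.mpr (by tauto))
          · simp [pvG, hc, h0, List.getLast?_cons_cons] at hx ⊢
            exact hx

theorem pvLoopA_eq (cs : List Char) (i lc lnp : Int) :
    pvLoopA cs i lc lnp =
      (lc + ((pvG cs).1 : Int),
        if (pvG cs).1 = 0 then lnp else i + (cs.length : Int) - ((pvG cs).2 : Int) - 1) := by
  induction cs using pvG.induct generalizing i lc lnp with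
  | case1 => simp [pvLoopA, pvG]
  | case2 r ih =>
      rw [pvLoopA, ih]
      rcases eq_or_ne (pvG r).1 0 with h0 | h0
      · have := pvG_zero r h0
        simp [pvG, h0, this]; ring
      · simp [pvG, h0]; constructor
        · ring
        · ring
  | case3 c r hne hc ih =>
      rw [pvLoopA.eq_3 _ _ _ _ _ hne, if_pos hc, ih]
      rcases eq_or_ne (pvG r).1 0 with h0 | h0
      · have := pvG_zero r h0
        simp [pvG, hc, h0, this]; ring
      · simp [pvG, hc, h0]; exact ⟨by ring, by ring⟩
  | case4 c r hne hc ih =>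
      rw [pvLoopA.eq_3 _ _ _ _ _ hne, if_neg hc, ih]
      rcases eq_or_ne (pvG r).1 0 with h0 | h0
      · simp [pvG, hc, h0]
      · simp [pvG, hc, h0]; ring


theorem pvChar_eq_iff (c d : Char) : c = d ↔ c.toNat = d.toNat := by
  constructor
  · rintro rfl; rfl
  · intro h
    have h1 := Char.ofNat_toNat c
    rw [h] at h1
    rw [← h1, Char.ofNat_toNat]

def pvIsB : Char → Bool := fun c =>
  have n := c.toNat
  decide (n = 10) || decide (n = 13) || decide (n = 11) || decide (n = 12) || decide (n = 28) ||
    decide (n = 29) || decide (n = 30) || decide (n = 133) || decide (n = 8232) || decide (n = 8233)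

theorem pvSplitlines_eq (s : List Char) :
    PySem.Chars.splitlines s = PySem.Chars.splitlines.go pvIsB s [] [] := rfl

theorem pvIsB_dom (c : Char) (h : pvDomChar c = true) :
    pvIsB c = (decide (c = '\n') || decide (c = '\x0d')) := by
  have h10 : ('\n').toNat = 10 := by decide
  have h13 : ('\x0d').toNat = 13 := by decide
  simp only [pvIsB, pvDomChar] at *
  simp only [pvChar_eq_iff, h10, h13]
  simp at h
  rw [Bool.eq_iff_iff]
  simp
  omega

theorem pvGo_length (cs cur : List Char) (acc : List (List Char))
    (hD : ∀ c ∈ cs, pvDomChar c = true) :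
    (PySem.Chars.splitlines.go pvIsB cs cur acc).length =
      acc.length + (pvG cs).1 +
        (if (pvG cs).2 = 0 ∧ ((pvG cs).1 ≠ 0 ∨ cur = []) then 0 else 1) := by
  induction cs using pvG.induct generalizing cur acc with
  | case1 =>
      rw [PySem.Chars.splitlines.go]
      rcases List.eq_nil_or_concat cur with rfl | ⟨c, a, rfl⟩ <;> simp [pvG]
  | case2 r ih =>
      rw [PySem.Chars.splitlines.go]
      have hD' : ∀ c ∈ r, pvDomChar c = true := fun c hc => hD c (by simp [hc])
      rw [ih [] _ hD']
      rcases eq_or_ne (pvG r).1 0 with h0 | h0 <;> simp [pvG, h0] <;> omega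
  | case3 c r hne hc ih =>
      rw [PySem.Chars.splitlines.go.eq_3 _ _ _ _ _ hne]
      have hD' : ∀ c ∈ r, pvDomChar c = true := fun c hc => hD c (by simp [hc])
      rw [pvIsB_dom c (hD c (by simp))]
      have hb : (decide (c = '\n') || decide (c = '\x0d')) = true := by
        rcases hc with rfl | rfl <;> simp
      rw [if_pos hb, ih [] _ hD']
      rcases eq_or_ne (pvG r).1 0 with h0 | h0 <;> simp [pvG, hc, h0] <;> omega
  | case4 c r hne hc ih =>
      rw [PySem.Chars.splitlines.go.eq_3 _ _ _ _ _ hne]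
      have hD' : ∀ c ∈ r, pvDomChar c = true := fun c hc => hD c (by simp [hc])
      rw [pvIsB_dom c (hD c (by simp))]
      have hb : (decide (c = '\n') || decide (c = '\x0d')) = false := by
        simp at hc ⊢; tauto
      rw [if_neg (by simp [hb]), ih (c :: cur) _ hD']
      rcases eq_or_ne (pvG r).1 0 with h0 | h0 <;> simp [pvG, hc, h0]

theorem pvGo_last (cs cur : List Char) (acc : List (List Char))
    (hD : ∀ c ∈ cs, pvDomChar c = true)
    (h : (pvG cs).2 ≠ 0 ∨ ((pvG cs).1 = 0 ∧ cur ≠ [])) :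
    ∃ l, (PySem.Chars.splitlines.go pvIsB cs cur acc).getLast? = some l ∧
      l.length = (if (pvG cs).1 = 0 then cur.length else 0) + (pvG cs).2 := by
  induction cs using pvG.induct generalizing cur acc with
  | case1 =>
      rw [PySem.Chars.splitlines.go]
      simp [pvG] at h ⊢
      rcases List.eq_nil_or_concat cur with rfl | ⟨cur', a, rfl⟩
      · simp at h
      · simp
  | case2 r ih =>
      rw [PySem.Chars.splitlines.go]
      have hD' : ∀ c ∈ r, pvDomChar c = true := fun c hc => hD c (by simp [hc])
      have h' : (pvG r).2 ≠ 0 := by simp [pvG] at h; tauto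
      obtain ⟨l, hl, hlen⟩ := ih [] (cur.reverse :: acc) hD' (Or.inl h')
      refine ⟨l, hl, ?_⟩
      rcases eq_or_ne (pvG r).1 0 with h0 | h0 <;> simp [pvG, h0] at hlen ⊢ <;> omega
  | case3 c r hne hc ih =>
      rw [PySem.Chars.splitlines.go.eq_3 _ _ _ _ _ hne]
      have hD' : ∀ c ∈ r, pvDomChar c = true := fun c hc => hD c (by simp [hc])
      rw [pvIsB_dom c (hD c (by simp))]
      have hb : (decide (c = '\n') || decide (c = '\x0d')) = true := by
        rcases hc with rfl | rfl <;> simp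
      rw [if_pos hb]
      have h' : (pvG r).2 ≠ 0 := by simp [pvG, hc] at h; tauto
      obtain ⟨l, hl, hlen⟩ := ih [] (cur.reverse :: acc) hD' (Or.inl h')
      refine ⟨l, hl, ?_⟩
      rcases eq_or_ne (pvG r).1 0 with h0 | h0 <;> simp [pvG, hc, h0] at hlen ⊢ <;> omega
  | case4 c r hne hc ih =>
      rw [PySem.Chars.splitlines.go.eq_3 _ _ _ _ _ hne]
      have hD' : ∀ c ∈ r, pvDomChar c = true := fun c hc => hD c (by simp [hc])
      rw [pvIsB_dom c (hD c (by simp))]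
      have hb : (decide (c = '\n') || decide (c = '\x0d')) = false := by
        simp at hc ⊢; tauto
      rw [if_neg (by simp [hb])]
      rcases eq_or_ne (pvG r).1 0 with h0 | h0
      · obtain ⟨l, hl, hlen⟩ := ih (c :: cur) acc hD' (Or.inr ⟨h0, by simp⟩)
        refine ⟨l, hl, ?_⟩
        simp [pvG, hc, h0] at hlen ⊢; omega
      · have h' : (pvG r).2 ≠ 0 := by simp [pvG, hc, h0] at h; tauto
        obtain ⟨l, hl, hlen⟩ := ih (c :: cur) acc hD' (Or.inl h')
        refine ⟨l, hl, ?_⟩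
        simp [pvG, hc, h0] at hlen ⊢; omega

theorem pvGet_neg_one {α : Type} (xs : List α) (h : xs ≠ []) :
    PySem.List.pyGet? xs (-1) = xs.getLast? := by
  have hn : 1 ≤ xs.length := List.length_pos_iff.mpr h
  rw [PySem.List.pyGet?, PySem.List.pyIdx?]
  rw [if_neg (by omega), if_pos (by exact_mod_cast by omega)]
  simp [List.getLast?_eq_getElem?]

theorem pvEndswith_single (cs : List Char) (c : Char) :
    PySem.Chars.endswith cs [c] = (cs.getLast? == some c) := by
  rw [PySem.Chars.endswith, List.isSuffixOf, ← List.head?_reverse]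
  cases hr : cs.reverse with
  | nil => simp
  | cons x xs => simp [List.isPrefixOf, BEq.comm]

-- ===== VERDICT (by name: the statement is the Claim_ definition above) =====
theorem count_lines_and_columns_spec : Claim_equal_count_lines_and_columns := by
  intro text hdom
  unfold Spec_count_lines_and_columns count_lines_and_columns count_lines_and_columns_alt
  have hD : ∀ c ∈ text.toList, pvDomChar c = true := by
    unfold Dom_count_lines_and_columns pvDomStr at hdom
    simpa [List.all_eq_true] using hdom
  rcases eq_or_ne text.toList [] with hnil | hne
  · simp only [hnil, pvSplitlines_eq]
    rw [PySem.Chars.splitlines.go]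
    simp [PySem.Chars.endswith, List.isSuffixOf]
  · have hts : ¬text = "" := fun h => hne (by simp [h])
    simp only [List.isEmpty_iff, hne, pvSplitlines_eq,
      pvEndswith_single, pvGet_neg_one _ hne, pvLoopA_eq]
    rw [if_neg (by simp)]
    rw [pvGo_length _ _ _ hD]
    by_cases htr : (pvG text.toList).2 = 0
    · -- text ends with a line terminator
      have hlast := (pvG_last _ hne).mp htr
      have ht : (pvG text.toList).1 ≠ 0 := by
        intro h0
        have := pvG_zero _ h0
        rw [htr] at this
        exact hne (by simpa using this.symm)
      have hcond : (text.toList.getLast? == some '\n') = true ∨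
          (text.toList.getLast? == some '\x0d') = true := by
        rcases hlast with h | h <;> [left; right] <;> simp [h]
      rcases hcond with h | h <;>
        · simp [h, htr, ht, hts]
    · -- text does not end with a terminator
      have hlast : ¬(text.toList.getLast? = some '\n' ∨ text.toList.getLast? = some '\x0d') :=
        fun hco => htr ((pvG_last _ hne).mpr hco)
      rw [not_or] at hlast
      obtain ⟨l, hl, hlen⟩ := pvGo_last text.toList [] [] hD (Or.inl htr)
      rw [hl]
      by_cases ht : (pvG text.toList).1 = 0
      · have hz := pvG_zero _ ht
        simp [hlast.1, hlast.2, ht, hlen, hz, hts]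
      · have hlt := pvG_lt _ ht
        have hne1 : (0 : Int) + ↑text.toList.length - ↑(pvG text.toList).2 - 1 ≠ -1 := by
          omega
        simp [hlast.1, hlast.2, htr, ht, hlen]
        omega
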